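-- pv_equiv track=rewrite | github.com/felicityallen/SelfTarget | selftarget_pyutils/selftarget/profile.py | makeClassProfile
-- ===== SOURCE A (Python) =====
-- def makeClassProfile(p1):
--     p1_class = {}
--     for indel in p1:
--         if indel == '-': continue
--         indel_class = indel.split('_')[0]
--         if indel_class not in p1_class:
--             p1_class[indel_class] = 0
--         p1_class[indel_class] += p1[indel]
--     return p1_class
-- ===== SOURCE B (Python) =====
-- def makeClassProfile(p1):
--     items = [(k, v) for k, v in p1.items() if k != '-']
--     prefixes = []
--     for k, _ in items:
--         c = k.split('_')[0]
--         if c not in prefixes: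
--             prefixes.append(c)
--     return {c: sum(v for k, v in items if k.split('_')[0] == c) for c in prefixes}
-- ===== Notes on version B (the rewrite author's own statement) =====
-- stated objective: alternative
-- what changed: Replaces A's single hash-accumulation pass (setdefault-then-increment into a dict) with a two-phase grouped reduction: first collect the class prefixes in order of first occurrence, then build the result by summing, per prefix, all matching values with a comprehension.
import Mathlib
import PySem

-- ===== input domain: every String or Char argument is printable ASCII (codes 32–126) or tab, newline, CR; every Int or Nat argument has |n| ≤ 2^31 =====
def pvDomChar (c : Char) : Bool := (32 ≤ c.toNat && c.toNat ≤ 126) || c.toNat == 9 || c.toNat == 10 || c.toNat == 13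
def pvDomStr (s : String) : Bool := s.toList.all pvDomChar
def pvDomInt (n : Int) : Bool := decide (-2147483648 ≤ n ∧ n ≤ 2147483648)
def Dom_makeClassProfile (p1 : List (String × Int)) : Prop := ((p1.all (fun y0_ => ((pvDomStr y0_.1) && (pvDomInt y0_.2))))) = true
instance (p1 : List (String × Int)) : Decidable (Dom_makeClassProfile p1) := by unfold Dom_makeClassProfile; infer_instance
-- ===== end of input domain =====

-- B replaces A's single hash-accumulation pass with a two-phase grouped reduction
-- (first-occurrence prefix list, then per-prefix summation); same cost class, alternative shape.


-- ===== PORT A =====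
-- 'for indel in p1' iterates the dict's keys in insertion order = the pairs' first components;
-- indel.split('_')[0]: splitOn never returns [], so the [0] index is the Python-exact getD 0;
-- p1[indel] is the dict lookup (the key is present, so getD with any default is exact).
def makeClassProfile (p1 : List (String × Int)) : List (String × Int) :=
  (p1.foldl (fun p1_class kv =>
      if kv.1 == "-" then p1_class
      else
        let indel_class := ((PySem.Str.split? kv.1 "_").getD []).getD 0 ""
        let p1_class := if p1_class.contains indel_class then p1_class
                        else p1_class.insert indel_class 0
        p1_class.insert indel_class
          (p1_class.getD indel_class 0 + (PySem.Dict.mk p1).getD kv.1 0))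
    PySem.Dict.empty).items

-- ===== PORT B =====
def pvClsOf (k : String) : String := ((PySem.Str.split? k "_").getD []).getD 0 ""

def makeClassProfile_alt (p1 : List (String × Int)) : List (String × Int) :=
  let items := p1.filter (fun kv => kv.1 ≠ "-")
  let prefixes : PySem.Set String :=
    items.foldl (fun ps kv => PySem.Set.add ps (pvClsOf kv.1)) PySem.Set.empty
  prefixes.map (fun c => (c, ((items.filter (fun kv => pvClsOf kv.1 == c)).map (·.2)).sum))

-- ===== PRECONDITION & SPEC =====
-- Pre_ excludes association lists with duplicate keys: the argument is a Python dict,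
-- whose representation always has pairwise-distinct keys, so nothing A accepts is lost.
def Pre_makeClassProfile (p1 : List (String × Int)) : Prop := (p1.map Prod.fst).Nodup
instance (p1 : List (String × Int)) : Decidable (Pre_makeClassProfile p1) := by unfold Pre_makeClassProfile; infer_instance

def pvWitness_makeClassProfile : (List (String × Int)) := [("D1_x", 2), ("-", 5), ("I2_y", 3), ("D1_z", 4)]

def Spec_makeClassProfile (p1 : List (String × Int)) (out : List (String × Int)) : Prop := out = makeClassProfile_alt p1
instance (p1 : List (String × Int)) (out : List (String × Int)) : Decidable (Spec_makeClassProfile p1 out) := by unfold Spec_makeClassProfile; infer_instance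

-- ===== CLAIM (what is proved, stated in full; the proofs are below) =====
def Claim_equal_makeClassProfile : Prop := ∀ (p1 : List (String × Int)), Dom_makeClassProfile p1 → Pre_makeClassProfile p1 → Spec_makeClassProfile p1 (makeClassProfile p1)

-- ===== LEMMAS AND PROOFS =====

-- A's two-step setdefault-then-increment is a single modify.
theorem pvStep_eq_modify (d : PySem.Dict String Int) (c : String) (v : Int) :
    (let d' := if d.contains c then d else d.insert c 0
     d'.insert c (d'.getD c 0 + v)) = d.modify c 0 (· + v) := by
  by_cases h : d.contains c
  · simp [h, PySem.Dict.modify]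
  · simp [h, PySem.Dict.modify, PySem.Dict.insert_insert_self, PySem.Dict.getD_insert_self,
      PySem.Dict.getD_of_not_contains d (0 : Int) (by simpa using h)]

-- the value accumulated for a prefix is the sum of the matching values
theorem pvGetD_foldl_modify_sum (l : List (String × Int)) (d : PySem.Dict String Int) (c : String) :
    (l.foldl (fun d kv => d.modify (pvClsOf kv.1) 0 (· + kv.2)) d).getD c 0
      = d.getD c 0 + ((l.filter (fun kv => pvClsOf kv.1 == c)).map (·.2)).sum := by
  induction l generalizing d with
  | nil => simp
  | cons kv l ih =>
    simp only [List.foldl_cons, ih, List.filter_cons]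
    by_cases h : pvClsOf kv.1 = c
    · simp [h, PySem.Dict.getD_modify_self]
      ring
    · rw [PySem.Dict.getD_modify_of_ne _ _ _ (Ne.symm h)]
      simp [h]

theorem pvSpec_aux (p1 : List (String × Int)) (h : (p1.map Prod.fst).Nodup) :
    makeClassProfile p1 = makeClassProfile_alt p1 := by
  unfold makeClassProfile makeClassProfile_alt
  -- Step 1: dict lookup of a present key = the pair's value (keys are Nodup)
  have h1 : ∀ (d : PySem.Dict String Int) (kv : String × Int), kv ∈ p1 →
      (if kv.1 == "-" then d
       else
         let indel_class := ((PySem.Str.split? kv.1 "_").getD []).getD 0 ""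
         let d' := if d.contains indel_class then d else d.insert indel_class 0
         d'.insert indel_class (d'.getD indel_class 0 + (PySem.Dict.mk p1).getD kv.1 0))
      = (if kv.1 == "-" then d else d.modify (pvClsOf kv.1) 0 (· + kv.2)) := by
    intro d kv hmem
    by_cases hk : kv.1 = "-"
    · simp [hk]
    · have hval : (PySem.Dict.mk p1).getD kv.1 0 = kv.2 :=
        PySem.Dict.getD_of_mem_items (PySem.Dict.mk p1)
          (show (kv.1, kv.2) ∈ (PySem.Dict.mk p1).items by simpa using hmem)
          (by simpa [PySem.Dict.keys] using h) 0
      simp only [hk, beq_iff_eq, hval]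
      exact pvStep_eq_modify d (pvClsOf kv.1) kv.2
  rw [PySem.List.foldl_congr_mem p1 _ _ PySem.Dict.empty h1]
  -- Step 2: the skip of '-' is a fold over the filtered list
  have h2 : p1.foldl (fun d kv => if kv.1 == "-" then d else d.modify (pvClsOf kv.1) 0 (· + kv.2))
        PySem.Dict.empty
      = (p1.filter (fun kv => kv.1 ≠ "-")).foldl
          (fun d kv => d.modify (pvClsOf kv.1) 0 (· + kv.2)) PySem.Dict.empty := by
    rw [List.foldl_filter]
    apply PySem.List.foldl_congr_mem
    intro d kv _
    by_cases hk : kv.1 = "-" <;> simp [hk]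
  rw [h2]
  set items := p1.filter (fun kv => kv.1 ≠ "-") with hitems
  set res := items.foldl (fun d kv => d.modify (pvClsOf kv.1) 0 (· + kv.2)) PySem.Dict.empty with hres
  -- keys of the result = prefixes in order of first occurrence = B's prefix list
  have hkeys : res.keys = items.foldl (fun ps kv => PySem.Set.add ps (pvClsOf kv.1)) PySem.Set.empty := by
    rw [hres, PySem.Dict.keys_foldl_modify_key items (fun kv => pvClsOf kv.1) 0 (fun _ kv x => x + kv.2) PySem.Dict.empty]
    rw [← PySem.Set.update_map_eq_foldl_add]
    simp [PySem.Dict.keys_empty, PySem.Set.empty]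
  have hnd : res.keys.Nodup := by
    rw [hres]
    exact PySem.Dict.nodup_keys_foldl_modify_key _ _ _ _ _ (by simp)
  rw [PySem.Dict.items_eq_map_keys res hnd 0, hkeys]
  apply List.map_congr_left
  intro c _
  rw [← hkeys] at *
  congr 1
  rw [hres, pvGetD_foldl_modify_sum]
  simp

-- ===== VERDICT (by name: the statement is the Claim_ definition above) =====
theorem makeClassProfile_spec : Claim_equal_makeClassProfile := by
  intro p1 _ hpre
  unfold Spec_makeClassProfile
  exact pvSpec_aux p1 hpre
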